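-- pv_equiv track=rewrite | github.com/KaramDanialGit/LeetcodePractice | RobloxQuestions/RobloxQ4PilesOfBoxes.py | level_boxes
-- ===== SOURCE A (Python) =====
-- def level_boxes(boxes):
--     boxes.sort(reverse = True)
--     steps = 0
--     i = 0
--
--     while i < len(boxes) - 1:
--         if boxes[i + 1] < boxes[i]:
--             steps += i + 1
--         i += 1
--     return steps
-- ===== SOURCE B (Python) =====
-- def level_boxes(boxes):
--     boxes.sort(reverse=True)
--     # run-length encode the sorted list into (value, count) groups
--     groups = []
--     for x in boxes:
--         if groups and groups[-1][0] == x: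
--             v, c = groups[-1]
--             groups[-1] = (v, c + 1)
--         else:
--             groups.append((x, 1))
--     # every group except the last contributes the cumulative box count at its end
--     cum = 0
--     steps = 0
--     for _, c in groups[:-1]:
--         cum += c
--         steps += cum
--     return steps
-- ===== Notes on version B (the rewrite author's own statement) =====
-- stated objective: alternative
-- what changed: Replaced the adjacent-index drop scan over the sorted list by a run-length encoding into (value,count) groups followed by a prefix-sum over all groups but the last.
import Mathlib
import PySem

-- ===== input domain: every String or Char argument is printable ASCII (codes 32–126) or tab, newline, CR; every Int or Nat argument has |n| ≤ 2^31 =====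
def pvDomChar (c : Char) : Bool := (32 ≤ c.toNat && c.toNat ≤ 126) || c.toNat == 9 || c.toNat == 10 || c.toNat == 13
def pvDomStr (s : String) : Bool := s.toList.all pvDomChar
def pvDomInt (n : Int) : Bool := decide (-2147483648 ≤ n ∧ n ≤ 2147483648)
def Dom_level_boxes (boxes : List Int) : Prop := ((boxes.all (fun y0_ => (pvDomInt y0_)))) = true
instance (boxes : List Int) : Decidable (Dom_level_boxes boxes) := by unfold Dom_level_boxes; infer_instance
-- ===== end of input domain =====

-- B replaces A's adjacent-index drop scan by a run-length-encoding + prefix-sum pass (alternative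
-- decomposition, similar cost). Both Pythons sort the argument list in place; the equivalence
-- proved here is about the RETURN value (B performs the same mutation).

-- ===== PORT A =====
-- while i < len(boxes)-1: if boxes[i+1] < boxes[i]: steps += i+1; i += 1
def level_boxes (boxes : List Int) : Int :=
  let bs := PySem.List.sorted boxes (fun x => x) true
  (PySem.List.pyRange 0 ((bs.length : Int) - 1) 1).foldl
    (fun steps i =>
      if PySem.List.pyGetD bs (i + 1) 0 < PySem.List.pyGetD bs i 0 then steps + (i + 1) else steps)
    0

-- ===== PORT B =====
-- first loop of Source B: build run-length groups (append, or bump the count of the last group)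
def pvUpd (gs : List (Int × Int)) (x : Int) : List (Int × Int) :=
  match gs.getLast? with
  | some (v, c) => if v == x then gs.dropLast ++ [(v, c + 1)] else gs ++ [(x, 1)]
  | none => [(x, 1)]

def level_boxes_alt (boxes : List Int) : Int :=
  let bs := PySem.List.sorted boxes (fun x => x) true
  let groups := bs.foldl pvUpd []
  -- groups[:-1] is groups.dropLast (exact for any list); the loop carries (cum, steps)
  (groups.dropLast.foldl (fun (p : Int × Int) vc => (p.1 + vc.2, p.2 + (p.1 + vc.2))) (0, 0)).2

-- ===== PRECONDITION & SPEC =====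
def Spec_level_boxes (boxes : List Int) (out : Int) : Prop := out = level_boxes_alt boxes
instance (boxes : List Int) (out : Int) : Decidable (Spec_level_boxes boxes out) := by unfold Spec_level_boxes; infer_instance

-- ===== CLAIM (what is proved, stated in full; the proofs are below) =====
def Claim_equal_level_boxes : Prop := ∀ (boxes : List Int), Dom_level_boxes boxes → Spec_level_boxes boxes (level_boxes boxes)

-- ===== LEMMAS AND PROOFS =====

-- A's scan, structurally: compare adjacent elements, p is the 1-based position of the boundary
def dscan : List Int → Int → Int
  | a :: b :: t, p => (if b < a then p else 0) + dscan (b :: t) (p + 1)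
  | _, _ => 0

-- B's first loop, structurally: run-length encoding carrying the current run (v, c)
def goRLE (v : Int) (c : Int) : List Int → List (Int × Int)
  | [] => [(v, c)]
  | x :: t => if x = v then goRLE v (c + 1) t else (v, c) :: goRLE x 1 t

-- B's second loop, structurally: prefix sums of counts, excluding the last group
def gsum : List (Int × Int) → Int → Int
  | [], _ => 0
  | [_], _ => 0
  | p :: q :: t, cum => (cum + p.2) + gsum (q :: t) (cum + p.2)

theorem goRLE_ne_nil (v c : Int) (l : List Int) : goRLE v c l ≠ [] := by
  induction l generalizing v c with
  | nil => simp [goRLE]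
  | cons x t ih => by_cases h : x = v <;> simp [goRLE, h, ih]

-- A's index fold equals dscan on the enumerate/zip view
theorem ezfold (bs : List Int) : ∀ (s acc : Int),
    (PySem.List.enumerate (bs.zip bs.tail) s).foldl
      (fun steps p => if p.2.2 < p.2.1 then steps + (p.1 + 1) else steps) acc
      = acc + dscan bs (s + 1) := by
  induction bs with
  | nil => intro s acc; simp [dscan]
  | cons a t ih =>
    intro s acc
    cases t with
    | nil => simp [dscan]
    | cons b t' =>
      have hz : (a :: b :: t').zip (a :: b :: t').tail = (a, b) :: ((b :: t').zip (b :: t').tail) := by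
        simp [List.zip]
      rw [hz, PySem.List.enumerate_cons, List.foldl_cons, ih (s + 1)]
      show (if b < a then acc + (s + 1) else acc) + dscan (b :: t') (s + 1 + 1)
          = acc + dscan (a :: b :: t') (s + 1)
      rw [show dscan (a :: b :: t') (s + 1)
            = (if b < a then s + 1 else 0) + dscan (b :: t') (s + 1 + 1) from rfl]
      split_ifs <;> ring

-- A's index fold over pyRange equals dscan, for any list
theorem idxfold (bs : List Int) :
    (PySem.List.pyRange 0 ((bs.length : Int) - 1) 1).foldl
      (fun steps i =>
        if PySem.List.pyGetD bs (i + 1) 0 < PySem.List.pyGetD bs i 0 then steps + (i + 1) else steps)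
      0 = dscan bs 1 := by
  cases hb : bs with
  | nil => simp [PySem.List.pyRange, dscan]
  | cons a t =>
    rw [← hb]
    have hlen : ((bs.zip bs.tail).length : Int) = (bs.length : Int) - 1 := by
      rw [hb]; simp [List.length_zip]
    have h1 := ezfold bs 0 0
    rw [PySem.List.enumerate_eq_map_pyRange (bs.zip bs.tail) (0, 0), List.foldl_map,
        PySem.List.len_eq, hlen, zero_add, zero_add] at h1
    rw [← h1]
    apply PySem.List.foldl_congr_mem
    intro acc i hi
    rw [PySem.List.mem_pyRange_one] at hi
    obtain ⟨h0, hlt⟩ := hi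
    have hlz : (bs.zip bs.tail).length = bs.length - 1 := by simp [List.length_zip]
    have hiz : i < ((bs.zip bs.tail).length : Int) := by omega
    have hiN : i.toNat < (bs.zip bs.tail).length := by omega
    have hi1 : i.toNat < bs.length := by omega
    have hi2 : i.toNat + 1 < bs.length := by omega
    have hget : PySem.List.pyGetD (bs.zip bs.tail) i (0, 0) = (bs.zip bs.tail)[i.toNat] :=
      PySem.List.pyGetD_eq_getElem _ (0, 0) h0 (by simpa using hiz)
    have hg1 : PySem.List.pyGetD bs i 0 = bs[i.toNat] :=
      PySem.List.pyGetD_eq_getElem _ 0 h0 (by omega)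
    have hg2 : PySem.List.pyGetD bs (i + 1) 0 = bs[i.toNat + 1] := by
      have h := PySem.List.pyGetD_eq_getElem bs 0 (i := i + 1) (by omega) (by omega)
      rw [h]
      congr 1
      omega
    have hpair : (bs.zip bs.tail)[i.toNat] = (bs[i.toNat], bs[i.toNat + 1]) := by
      rw [List.getElem_zip]
      congr 1
      rw [List.getElem_tail]
    rw [hget, hpair, hg1, hg2]

-- B's first loop equals goRLE
theorem foldl_upd_concat (l : List Int) : ∀ (gs : List (Int × Int)) (v c : Int),
    List.foldl pvUpd (gs ++ [(v, c)]) l = gs ++ goRLE v c l := by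
  induction l with
  | nil => intro gs v c; simp [goRLE]
  | cons x t ih =>
    intro gs v c
    rw [List.foldl_cons]
    by_cases h : x = v
    · have hu : pvUpd (gs ++ [(v, c)]) x = gs ++ [(v, c + 1)] := by
        simp [pvUpd, h]
      rw [hu, ih, goRLE, if_pos h]
    · have hu : pvUpd (gs ++ [(v, c)]) x = (gs ++ [(v, c)]) ++ [(x, 1)] := by
        simp [pvUpd, Ne.symm h]
      rw [hu, ih, goRLE, if_neg h, List.append_assoc]
      rfl

-- B's second loop equals gsum
theorem foldl_dropLast_eq_gsum (gl : List (Int × Int)) : ∀ (cum acc : Int),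
    (gl.dropLast.foldl (fun (p : Int × Int) vc => (p.1 + vc.2, p.2 + (p.1 + vc.2))) (cum, acc)).2
      = acc + gsum gl cum := by
  induction gl with
  | nil => intro cum acc; simp [gsum]
  | cons p t ih =>
    intro cum acc
    cases t with
    | nil => simp [gsum]
    | cons q t' =>
      rw [List.dropLast_cons₂, List.foldl_cons, ih]
      rw [show gsum (p :: q :: t') cum = (cum + p.2) + gsum (q :: t') (cum + p.2) from rfl]
      ring

-- core: on a descending list, the drop scan equals the prefix-sum over run-length groups
theorem dscan_eq_gsum (t : List Int) : ∀ (v c cum : Int),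
    (∀ x ∈ t, x ≤ v) → t.Pairwise (fun a b => b ≤ a) →
    dscan (v :: t) (cum + c) = gsum (goRLE v c t) cum := by
  induction t with
  | nil => intro v c cum _ _; simp [dscan, goRLE, gsum]
  | cons x t' ih =>
    intro v c cum hle hpw
    have hxv : x ≤ v := hle x (by simp)
    have hpw' : t'.Pairwise (fun a b => b ≤ a) := (List.pairwise_cons.mp hpw).2
    have hxt : ∀ y ∈ t', y ≤ x := (List.pairwise_cons.mp hpw).1
    rw [show dscan (v :: x :: t') (cum + c)
          = (if x < v then cum + c else 0) + dscan (x :: t') (cum + c + 1) from rfl]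
    by_cases h : x = v
    · subst h
      rw [goRLE, if_pos rfl, if_neg (lt_irrefl x),
          show cum + c + 1 = cum + (c + 1) by ring, ih x (c + 1) cum hxt hpw']
      ring
    · have hlt : x < v := lt_of_le_of_ne hxv h
      rw [goRLE, if_neg h, if_pos hlt,
          show cum + c + 1 = (cum + c) + 1 by ring, ih x 1 (cum + c) hxt hpw']
      cases hg : goRLE x 1 t' with
      | nil => exact absurd hg (goRLE_ne_nil x 1 t')
      | cons g0 gt =>
        rw [show gsum ((v, c) :: g0 :: gt) cum
              = (cum + c) + gsum (g0 :: gt) (cum + c) from rfl]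

-- B's whole body equals gsum of goRLE, for any list
theorem altfold (bs : List Int) :
    (((bs.foldl pvUpd []).dropLast.foldl
        (fun (p : Int × Int) vc => (p.1 + vc.2, p.2 + (p.1 + vc.2))) (0, 0)).2)
      = (match bs with
         | [] => 0
         | a :: t => gsum (goRLE a 1 t) 0) := by
  cases bs with
  | nil => simp
  | cons a t =>
    have hfold : List.foldl pvUpd [] (a :: t) = goRLE a 1 t := by
      rw [List.foldl_cons, show pvUpd [] a = [] ++ [(a, 1)] from rfl, foldl_upd_concat]
      simp
    rw [hfold, foldl_dropLast_eq_gsum, zero_add]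

-- ===== VERDICT (by name: the statement is the Claim_ definition above) =====
theorem level_boxes_spec : Claim_equal_level_boxes := by
  intro boxes _
  unfold Spec_level_boxes
  show (PySem.List.pyRange 0 (((PySem.List.sorted boxes (fun x => x) true).length : Int) - 1) 1).foldl
      (fun steps i =>
        if PySem.List.pyGetD (PySem.List.sorted boxes (fun x => x) true) (i + 1) 0
             < PySem.List.pyGetD (PySem.List.sorted boxes (fun x => x) true) i 0
         then steps + (i + 1) else steps) 0
    = (((PySem.List.sorted boxes (fun x => x) true).foldl pvUpd []).dropLast.foldl
        (fun (p : Int × Int) vc => (p.1 + vc.2, p.2 + (p.1 + vc.2))) (0, 0)).2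
  rw [idxfold, altfold]
  have hpw := PySem.List.sorted_pairwise_rev boxes (fun x => x)
  cases hb : PySem.List.sorted boxes (fun x => x) true with
  | nil => simp [dscan]
  | cons a t =>
    rw [hb] at hpw
    have := dscan_eq_gsum t a 1 0 (fun x hx => (List.pairwise_cons.mp hpw).1 x hx)
      (List.pairwise_cons.mp hpw).2
    simpa using this
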